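-- pv_equiv track=rewrite | github.com/ghdic/CodingProblemSolving | programmers/더 맵게.py | solution
-- ===== SOURCE A (Python) =====
-- import heapq
--
-- def solution(scoville, K):
--     heapq.heapify(scoville)
--     result = 0
--
--     while len(scoville) >= 2:
--         item = heapq.heappop(scoville)
--         if item >= K:
--             return result
--
--         heapq.heappush(scoville, item + heapq.heappop(scoville)*2)
--         result += 1
--
--     # 마지막으로 남은 원소가 K 이상인지 체크
--     return result if scoville[0] >= K else -1
-- ===== SOURCE B (Python) =====
-- def solution(scoville, K):
--     # Sort once; consume the two smallest from an advancing front index i and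
--     # re-insert each mixed value at its binary-searched position, keeping
--     # s[i:] sorted.  (Unlike A, does not mutate the argument.)
--     s = sorted(scoville)
--     i = 0
--     result = 0
--     while len(s) - i >= 2:
--         if s[i] >= K:
--             return result
--         v = s[i] + s[i + 1] * 2
--         i += 2
--         lo, hi = i, len(s)
--         while lo < hi:
--             mid = (lo + hi) // 2
--             if s[mid] <= v:
--                 lo = mid + 1
--             else:
--                 hi = mid
--         s.insert(lo, v)
--         result += 1
--     return result if s[i] >= K else -1
-- ===== Notes on version B (the rewrite author's own statement) =====
-- stated objective: alternative
-- what changed: Replaces the binary heap with a single initial sort plus a sorted working list: the two minima are popped from the front and each mixed value is re-inserted at a binary-searched position past an advancing front index, instead of heapify/heappop/heappush sift operations; B also leaves the argument unmutated where A heapifies it in place.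
import Mathlib
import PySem

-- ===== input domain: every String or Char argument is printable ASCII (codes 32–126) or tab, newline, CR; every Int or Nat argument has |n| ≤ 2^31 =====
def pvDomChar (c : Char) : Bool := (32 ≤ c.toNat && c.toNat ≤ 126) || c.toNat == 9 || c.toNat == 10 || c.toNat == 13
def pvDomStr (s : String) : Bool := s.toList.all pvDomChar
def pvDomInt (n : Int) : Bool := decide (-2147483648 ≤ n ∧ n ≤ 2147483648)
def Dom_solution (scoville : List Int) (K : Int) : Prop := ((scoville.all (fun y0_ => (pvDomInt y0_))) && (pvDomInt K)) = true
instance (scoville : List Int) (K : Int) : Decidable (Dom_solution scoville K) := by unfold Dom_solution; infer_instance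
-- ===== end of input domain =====

-- B replaces A's binary heap with a single sort plus sorted-list front-pops and scan-insertion
-- (objective: alternative). A mutates its argument (heapify + pops) in place; B does not — the
-- equivalence proved here is about the RETURN value only.


-- ===== PORT A =====
-- PySem has no heapq, so A's library calls are ported by their documented semantics, exact for
-- the RETURN value: heapq.heappop removes and returns the smallest element (ties are equal Int
-- values, so which copy is removed is unobservable in the return value), heapq.heappush adds an
-- element, heapq.heapify only rearranges the list in place (identity on the multiset of values).
def pyHeapPop (h : List Int) : Option (Int × List Int) :=
  (PySem.List.min? h (fun v => v)).bind
    (fun m => (PySem.List.remove? h m).map (fun rest => (m, rest)))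

theorem pyHeapPop_length {h : List Int} {x : Int} {h1 : List Int}
    (hp : pyHeapPop h = some (x, h1)) : h1.length + 1 = h.length := by
  unfold pyHeapPop at hp
  cases hm : PySem.List.min? h (fun v => v) with
  | none => rw [hm] at hp; simp at hp
  | some m =>
    rw [hm] at hp
    simp only [Option.bind_some] at hp
    have hmem : m ∈ h := PySem.List.min?_mem hm
    rw [PySem.List.remove?_eq_some_erase h m hmem] at hp
    simp only [Option.map_some, Option.some.injEq, Prod.mk.injEq] at hp
    obtain ⟨-, hh1⟩ := hp
    subst hh1
    have hl := List.length_erase_of_mem hmem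
    have hpos := List.length_pos_of_mem hmem
    omega

-- the while-loop of A: state = the heap's multiset of values, result = the counter
def solutionLoop (K : Int) (h : List Int) (result : Int) : Int :=
  if 2 ≤ h.length then
    match hp : pyHeapPop h with
    | none => -1  -- unreachable: h is nonempty here
    | some (item, h1) =>
      if item ≥ K then result
      else
        match hp2 : pyHeapPop h1 with
        | none => -1  -- unreachable: h1 is nonempty here
        | some (y, h2) => solutionLoop K (h2 ++ [item + y * 2]) (result + 1)
  else
    match h with
    | [] => -1  -- Python raises IndexError on scoville[0]; excluded by Pre_solution
    | z :: _ => if z ≥ K then result else -1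
termination_by h.length
decreasing_by
  have l1 := pyHeapPop_length hp
  have l2 := pyHeapPop_length hp2
  simp only [List.length_append, List.length_cons, List.length_nil]
  omega

def solution (scoville : List Int) (K : Int) : Int :=
  solutionLoop K scoville 0

-- ===== PORT B =====
-- Source B's advancing front index i makes s[i:] the working pool, so the port carries that suffix
-- directly: the two front elements are the two smallest, Source B's hand-written binary-search loop
-- over s with lo = i is exactly bisect_right on the suffix (PySem.List.bisectRight), and
-- s.insert(lo, v) is PySem.List.insert on the suffix. Exact for the return value.
def altLoop (K : Int) (s : List Int) (result : Int) : Int :=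
  match s with
  | x :: y :: rest =>
    if x ≥ K then result
    else
      altLoop K
        (PySem.List.insert rest ((PySem.List.bisectRight rest (x + y * 2) : Nat) : Int) (x + y * 2))
        (result + 1)
  | [z] => if z ≥ K then result else -1
  | [] => -1  -- Python raises IndexError on s[0]; excluded by Pre_solution
termination_by s.length
decreasing_by
  simp only [PySem.List.length_insert, List.length_cons]
  omega

def solution_alt (scoville : List Int) (K : Int) : Int :=
  altLoop K (PySem.List.sorted scoville (fun v => v)) 0

-- ===== PRECONDITION & SPEC =====
-- Pre_ excludes only the empty list, on which both A and B raise IndexError.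
def Pre_solution (scoville : List Int) (K : Int) : Prop := scoville ≠ []
instance (scoville : List Int) (K : Int) : Decidable (Pre_solution scoville K) := by unfold Pre_solution; infer_instance
def pvWitness_solution : List Int × Int := ([1, 2, 3, 9, 10, 12], 7)

def Spec_solution (scoville : List Int) (K : Int) (out : Int) : Prop := out = solution_alt scoville K
instance (scoville : List Int) (K : Int) (out : Int) : Decidable (Spec_solution scoville K out) := by unfold Spec_solution; infer_instance

-- ===== CLAIM (what is proved, stated in full; the proofs are below) =====
def Claim_equal_solution : Prop := ∀ (scoville : List Int) (K : Int), Dom_solution scoville K → Pre_solution scoville K → Spec_solution scoville K (solution scoville K)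

-- ===== LEMMAS AND PROOFS =====

-- popping the heap's minimum = taking the head of the sorted view
theorem pop_sorted {h : List Int} {x : Int} {t : List Int}
    (hs : PySem.List.sorted h (fun v => v) = x :: t) :
    pyHeapPop h = some (x, h.erase x) ∧ PySem.List.sorted (h.erase x) (fun v => v) = t := by
  have hxh : x ∈ h := by
    have hx : x ∈ PySem.List.sorted h (fun v => v) false := by
      rw [hs]; exact List.mem_cons_self
    exact (PySem.List.mem_sorted h (fun v => v) false x).1 hx
  have hperm : (x :: t).Perm h := hs ▸ PySem.List.sorted_perm h (fun v => v) false
  have hpt : (x :: t).Pairwise (fun a b => a ≤ b) := hs ▸ PySem.List.sorted_pairwise h (fun v => v)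
  have hmin : PySem.List.min? h (fun v => v) = some x := by
    cases hm : PySem.List.min? h (fun v => v) with
    | none =>
      exact absurd ((PySem.List.min?_eq_none_iff h (fun v => v)).1 hm) (List.ne_nil_of_mem hxh)
    | some m =>
      have hmem : m ∈ h := PySem.List.min?_mem hm
      have h1 : m ≤ x := PySem.List.min?_isMin hm x hxh
      have h2 : x ≤ m := PySem.List.key_head_sorted_le h (fun v => v) hs m hmem
      rw [le_antisymm h1 h2]
  refine ⟨?_, ?_⟩
  · unfold pyHeapPop
    rw [hmin]
    simp only [Option.bind_some]
    rw [PySem.List.remove?_eq_some_erase h x hxh]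
    rfl
  · have hperm' : t.Perm (h.erase x) := by
      have h1 := hperm.erase x
      simpa using h1
    exact PySem.List.sorted_id_eq_of_perm_of_pairwise _ _ hperm' (List.Pairwise.of_cons hpt)

-- sorted (l ++ [v]) = linear-insert v into sorted l
theorem sorted_append_singleton (l : List Int) (v : Int) :
    PySem.List.sorted (l ++ [v]) (fun w => w) =
      PySem.List.insertBy (fun a b => decide (a < b)) v (PySem.List.sorted l (fun w => w)) := by
  rw [PySem.List.sorted_eq_foldl_insertBy, PySem.List.sorted_eq_foldl_insertBy, List.foldl_append]
  rfl

-- linear insertion into a sorted list = splitting it at any bisect_right-style boundary p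
theorem insertBy_eq_take_drop (v : Int) : ∀ (t : List Int) (p : Nat), p ≤ t.length →
    (∀ (j : Nat) (hj : j < t.length), j < p → t[j] ≤ v) →
    (∀ (j : Nat) (hj : j < t.length), p ≤ j → v < t[j]) →
    PySem.List.insertBy (fun a b => decide (a < b)) v t = t.take p ++ v :: t.drop p := by
  intro t
  induction t with
  | nil =>
    intro p hple _ _
    have : p = 0 := by simpa using hple
    subst this
    rfl
  | cons y t' ih =>
    intro p hple hb ha
    by_cases hv : v < y
    · have hp0 : p = 0 := by
        by_contra hne
        have hy := hb 0 (by simp) (by omega)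
        simp at hy
        exact absurd hv (not_lt.2 hy)
      subst hp0
      simp [PySem.List.insertBy, hv]
    · have hppos : 1 ≤ p := by
        by_contra hlt
        have hy := ha 0 (by simp) (by omega)
        simp at hy
        exact hv hy
      obtain ⟨q, rfl⟩ : ∃ q, p = q + 1 := ⟨p - 1, by omega⟩
      simp only [PySem.List.insertBy, hv, decide_false, Bool.false_eq_true, if_false,
        List.take_succ_cons, List.drop_succ_cons, List.cons_append, List.cons.injEq, true_and]
      exact ih q (by simpa using hple)
        (fun j hj hjq => by
          have := hb (j + 1) (by simp; omega) (by omega)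
          simpa using this)
        (fun j hj hq => by
          have := ha (j + 1) (by simp; omega) (by omega)
          simpa using this)

-- Source B's binary-searched insert position = linear insertion, on a sorted working list
theorem insert_bisect_eq_insertBy (t : List Int) (v : Int) (hp : t.Pairwise (fun a b => a ≤ b)) :
    PySem.List.insert t ((PySem.List.bisectRight t v : Nat) : Int) v =
      PySem.List.insertBy (fun a b => decide (a < b)) v t := by
  obtain ⟨hle, hbefore, hafter⟩ := PySem.List.bisectRight_spec t v hp
  rw [PySem.List.insert_natCast t (PySem.List.bisectRight t v) v hle]
  exact (insertBy_eq_take_drop v t (PySem.List.bisectRight t v) hle hbefore hafter).symm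

-- main invariant: A's loop on the heap's multiset h = B's loop on the sorted view of h
theorem loop_eq (K : Int) : ∀ (n : Nat) (h : List Int) (result : Int), h.length ≤ n →
    solutionLoop K h result = altLoop K (PySem.List.sorted h (fun v => v)) result := by
  intro n
  induction n with
  | zero =>
    intro h result hlen
    have hnil : h = [] := List.eq_nil_of_length_eq_zero (Nat.le_zero.1 hlen)
    subst hnil
    rw [solutionLoop, altLoop.eq_def]
    rw [if_neg (by norm_num)]
    rfl
  | succ n ih =>
    intro h result hlen
    cases hs : PySem.List.sorted h (fun v => v) with
    | nil =>
      have hnil : h = [] := (PySem.List.sorted_eq_nil_iff h (fun v => v) false).1 hs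
      subst hnil
      rw [solutionLoop, altLoop.eq_def]
      rw [if_neg (by norm_num)]
    | cons x t =>
      cases t with
      | nil =>
        have hl1 : h.length = 1 := by
          have hls := PySem.List.length_sorted h (fun v => v) false
          rw [hs] at hls; simpa using hls.symm
        obtain ⟨w, hw⟩ : ∃ w, h = [w] := List.length_eq_one_iff.1 hl1
        subst hw
        have hwx : w = x := by
          have hsw : PySem.List.sorted [w] (fun v : Int => v) = [w] :=
            PySem.List.sorted_eq_self_of_pairwise _ _ (by simp)
          rw [hsw] at hs
          exact (List.cons.injEq _ _ _ _ ▸ hs).1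
        subst hwx
        rw [solutionLoop, altLoop.eq_def]
        rw [if_neg (by norm_num)]
      | cons y t' =>
        obtain ⟨hpop1, hs1⟩ := pop_sorted hs
        obtain ⟨hpop2, hs2⟩ := pop_sorted hs1
        have hl2 : 2 ≤ h.length := by
          have hls := PySem.List.length_sorted h (fun v => v) false
          rw [hs] at hls; simp at hls; omega
        have hlen1 := pyHeapPop_length hpop1
        have hlen2 := pyHeapPop_length hpop2
        rw [solutionLoop.eq_def, if_pos hl2]
        split
        next heq => rw [hpop1] at heq; simp at heq
        next item h1 heq =>
          rw [hpop1] at heq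
          injection heq with heq'
          injection heq' with hitem hh1
          subst hitem; subst hh1
          rw [altLoop]
          by_cases hK : x ≥ K
          · rw [if_pos hK, if_pos hK]
          · rw [if_neg hK, if_neg hK]
            split
            next heq2 => rw [hpop2] at heq2; simp at heq2
            next yy h2 heq2 =>
              rw [hpop2] at heq2
              injection heq2 with heq2'
              injection heq2' with hy hh2
              subst hy; subst hh2
              have hlen' : ((h.erase x).erase y ++ [x + y * 2]).length ≤ n := by
                simp only [List.length_append, List.length_cons, List.length_nil]
                omega
              have hpt' : t'.Pairwise (fun a b => a ≤ b) := by
                have hp := PySem.List.sorted_pairwise h (fun v => v)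
                rw [hs] at hp
                exact (List.Pairwise.of_cons (List.Pairwise.of_cons hp))
              rw [ih _ (result + 1) hlen', sorted_append_singleton, hs2,
                insert_bisect_eq_insertBy t' (x + y * 2) hpt']

-- ===== VERDICT (by name: the statement is the Claim_ definition above) =====
theorem solution_spec : Claim_equal_solution := by
  intro scoville K _ _
  unfold Spec_solution solution solution_alt
  exact loop_eq K scoville.length scoville 0 le_rfl
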